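-- pv_equiv track=rewrite | github.com/logsnaath/refhost-mon | async_hostmon.py | get_specific_refhosts
-- ===== SOURCE A (Python) =====
-- def get_specific_refhosts(data, location=None, arch=None, product=None, version=None):
--     filtered_hosts = {}
--
--     for hostname, host_info in data.items():
--         if (
--             (not location or host_info['location'] == location) and
--             (not arch or host_info['arch'] == arch) and
--             (not product or host_info['product'] == product) and
--             (not version or host_info['version'] == version)
--         ):
--             filtered_hosts[hostname] = host_info
--
--     return filtered_hosts
-- ===== SOURCE B (Python) =====
-- def get_specific_refhosts(data, location=None, arch=None, product=None, version=None):
--     result = dict(data)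
--     for field, value in (("location", location), ("arch", arch),
--                          ("product", product), ("version", version)):
--         if value:
--             result = {h: info for h, info in result.items() if info[field] == value}
--     return result
-- ===== Notes on version B (the rewrite author's own statement) =====
-- stated objective: alternative
-- what changed: Replaces the single loop testing one four-way conjunction per host with progressive narrowing: start from a copy of the data and, for each truthy filter field in turn, keep only the entries whose field equals it (one pass per active filter).
import Mathlib
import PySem

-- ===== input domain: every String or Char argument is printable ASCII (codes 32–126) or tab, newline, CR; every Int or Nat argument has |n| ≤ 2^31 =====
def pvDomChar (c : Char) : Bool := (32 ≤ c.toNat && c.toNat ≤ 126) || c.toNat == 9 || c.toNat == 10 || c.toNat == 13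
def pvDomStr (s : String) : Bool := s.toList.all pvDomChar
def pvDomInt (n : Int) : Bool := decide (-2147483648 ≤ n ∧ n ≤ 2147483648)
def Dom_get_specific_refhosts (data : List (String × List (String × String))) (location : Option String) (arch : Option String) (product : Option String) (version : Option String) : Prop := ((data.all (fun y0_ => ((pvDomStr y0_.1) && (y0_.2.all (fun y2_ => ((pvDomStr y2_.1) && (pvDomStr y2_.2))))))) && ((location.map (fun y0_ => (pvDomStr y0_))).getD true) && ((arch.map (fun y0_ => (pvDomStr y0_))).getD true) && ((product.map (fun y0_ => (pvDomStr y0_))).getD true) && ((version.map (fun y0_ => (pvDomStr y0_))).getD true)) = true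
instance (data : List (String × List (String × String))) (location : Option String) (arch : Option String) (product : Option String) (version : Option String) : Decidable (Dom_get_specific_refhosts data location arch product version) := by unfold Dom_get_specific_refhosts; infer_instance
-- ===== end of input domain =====

-- B rewrites the single combined per-host test as progressive narrowing: one filter pass per
-- active field (alternative decomposition, same cost). Equivalence is about the return value.

-- ===== PORT A =====
-- Python truthiness of an Optional[str]: None and "" are falsy.
def pvTruthy (o : Option String) : Bool :=
  match o with
  | none => false
  | some s => !(s == "")

-- host_info[key]: first-match lookup; exact under Pre_ (the key is present whenever looked up).
def pvLookup (info : List (String × String)) (key : String) : String :=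
  (((info.find? (fun p => p.1 == key)).map (fun p => p.2)).getD "")

def get_specific_refhosts (data : List (String × List (String × String))) (location : Option String) (arch : Option String) (product : Option String) (version : Option String) : List (String × List (String × String)) :=
  data.foldl (fun filtered hp =>
    if ((!pvTruthy location || (pvLookup hp.2 "location" == location.getD ""))
      && (!pvTruthy arch || (pvLookup hp.2 "arch" == arch.getD ""))
      && (!pvTruthy product || (pvLookup hp.2 "product" == product.getD ""))
      && (!pvTruthy version || (pvLookup hp.2 "version" == version.getD "")))
    then filtered ++ [hp] else filtered) []

-- ===== PORT B =====
-- one narrowing pass: if the filter value is truthy, keep only hosts whose field equals it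
def pvPass (key : String) (value : Option String) (result : List (String × List (String × String))) : List (String × List (String × String)) :=
  match value with
  | none => result
  | some v => if v == "" then result else result.filter (fun hp => pvLookup hp.2 key == v)

def get_specific_refhosts_alt (data : List (String × List (String × String))) (location : Option String) (arch : Option String) (product : Option String) (version : Option String) : List (String × List (String × String)) :=
  pvPass "version" version (pvPass "product" product (pvPass "arch" arch (pvPass "location" location data)))

-- ===== PRECONDITION & SPEC =====
-- A raises KeyError on a host exactly when, walking its short-circuiting conjunction in order,
-- an ACTIVE (truthy) filter reaches a host that lacks that field; pvHostOk states this: each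
-- field must be present if its filter is truthy and all earlier active filters matched the host.
def pvHostOk (hp : String × List (String × String)) (location : Option String) (arch : Option String) (product : Option String) (version : Option String) : Prop :=
  (pvTruthy location = true → "location" ∈ hp.2.map Prod.fst) ∧
  ((pvTruthy location = true → pvLookup hp.2 "location" = location.getD "") →
    (pvTruthy arch = true → "arch" ∈ hp.2.map Prod.fst) ∧
    ((pvTruthy arch = true → pvLookup hp.2 "arch" = arch.getD "") →
      (pvTruthy product = true → "product" ∈ hp.2.map Prod.fst) ∧
      ((pvTruthy product = true → pvLookup hp.2 "product" = product.getD "") →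
        (pvTruthy version = true → "version" ∈ hp.2.map Prod.fst))))

-- Pre_ excludes exactly (i) the inputs on which the Python A raises KeyError (some host lacks a
-- field an active filter actually accesses, per pvHostOk) and (ii) association lists with
-- duplicate hostnames or duplicate keys inside a host, which cannot reach the Python (it takes
-- dicts, where such duplicates collapse).
def Pre_get_specific_refhosts (data : List (String × List (String × String))) (location : Option String) (arch : Option String) (product : Option String) (version : Option String) : Prop :=
  (data.map Prod.fst).Nodup ∧
  ∀ hp ∈ data, (hp.2.map Prod.fst).Nodup ∧ pvHostOk hp location arch product version
instance (data : List (String × List (String × String))) (location : Option String) (arch : Option String) (product : Option String) (version : Option String) : Decidable (Pre_get_specific_refhosts data location arch product version) := by unfold Pre_get_specific_refhosts pvHostOk; infer_instance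

def pvWitness_get_specific_refhosts : (List (String × List (String × String))) × Option String × Option String × Option String × Option String :=
  ([("h1", [("location", "us"), ("arch", "x86"), ("product", "sles"), ("version", "12")]),
    ("h2", [("location", "de"), ("arch", "arm"), ("product", "sles"), ("version", "15")])],
   some "us", none, none, some "12")

def Spec_get_specific_refhosts (data : List (String × List (String × String))) (location : Option String) (arch : Option String) (product : Option String) (version : Option String) (out : List (String × List (String × String))) : Prop := out = get_specific_refhosts_alt data location arch product version
instance (data : List (String × List (String × String))) (location : Option String) (arch : Option String) (product : Option String) (version : Option String) (out : List (String × List (String × String))) : Decidable (Spec_get_specific_refhosts data location arch product version out) := by unfold Spec_get_specific_refhosts; infer_instance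

-- ===== CLAIM (what is proved, stated in full; the proofs are below) =====
def Claim_equal_get_specific_refhosts : Prop := ∀ (data : List (String × List (String × String))) (location : Option String) (arch : Option String) (product : Option String) (version : Option String), Dom_get_specific_refhosts data location arch product version → Pre_get_specific_refhosts data location arch product version → Spec_get_specific_refhosts data location arch product version (get_specific_refhosts data location arch product version)

-- ===== LEMMAS AND PROOFS =====

-- a narrowing pass IS a filter by the corresponding disjunctive test of A
theorem pvPass_eq_filter (key : String) (o : Option String) (res : List (String × List (String × String))) :
    pvPass key o res = res.filter (fun hp => !pvTruthy o || (pvLookup hp.2 key == o.getD "")) := by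
  match o with
  | none => simp [pvPass, pvTruthy]
  | some v =>
    by_cases h : v = ""
    · subst h; simp [pvPass, pvTruthy]
    · have hv : (v == "") = false := by simp [h]
      simp [pvPass, pvTruthy, h, hv]

theorem get_specific_refhosts_spec : Claim_equal_get_specific_refhosts := by
  intro data location arch product version _ _
  unfold Spec_get_specific_refhosts get_specific_refhosts get_specific_refhosts_alt
  rw [PySem.List.foldl_append_if_eq_filter]
  simp only [pvPass_eq_filter, List.filter_filter, List.nil_append]
  apply List.filter_congr
  intro hp _
  cases h1 : (!pvTruthy location || (pvLookup hp.2 "location" == location.getD "")) <;>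
  cases h2 : (!pvTruthy arch || (pvLookup hp.2 "arch" == arch.getD "")) <;>
  cases h3 : (!pvTruthy product || (pvLookup hp.2 "product" == product.getD "")) <;>
  cases h4 : (!pvTruthy version || (pvLookup hp.2 "version" == version.getD "")) <;>
  simp_all
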